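-- pv_equiv track=rewrite | github.com/Wumhqq/FlexE-P2MP-Restoration | assign_hop.py | _sender_candidates
-- ===== SOURCE A (Python) =====
-- from typing import Any, Dict, Iterable, List, Optional, Sequence, Tuple
--
-- def _sender_candidates(a: int, new_node_P2MP: Any) -> List[int]:
--     """不区分 hub/leaf；仅作为启发式优先尝试 base_fs>=0（可视为已激活）的 block。"""
--     active: List[int] = []
--     inactive: List[int] = []
--     for p in range(len(new_node_P2MP[a])):
--         try:
--             base_fs = int(new_node_P2MP[a][p][5])
--         except Exception:
--             base_fs = -1
--         if base_fs >= 0: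
--             active.append(p)
--         else:
--             inactive.append(p)
--     return active + inactive
-- ===== SOURCE B (Python) =====
-- def _sender_candidates(a, new_node_P2MP):
--     def _key(p):
--         try:
--             base_fs = int(new_node_P2MP[a][p][5])
--         except Exception:
--             base_fs = -1
--         return 0 if base_fs >= 0 else 1
--     return sorted(range(len(new_node_P2MP[a])), key=_key)
-- ===== Notes on version B (the rewrite author's own statement) =====
-- stated objective: idiomatic
-- what changed: Replaces the two-accumulator partition loop with a single stable sort of range(len(new_node_P2MP[a])) under a 0/1 activation key; stability preserves the original relative order of active and inactive indices.
import Mathlib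
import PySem

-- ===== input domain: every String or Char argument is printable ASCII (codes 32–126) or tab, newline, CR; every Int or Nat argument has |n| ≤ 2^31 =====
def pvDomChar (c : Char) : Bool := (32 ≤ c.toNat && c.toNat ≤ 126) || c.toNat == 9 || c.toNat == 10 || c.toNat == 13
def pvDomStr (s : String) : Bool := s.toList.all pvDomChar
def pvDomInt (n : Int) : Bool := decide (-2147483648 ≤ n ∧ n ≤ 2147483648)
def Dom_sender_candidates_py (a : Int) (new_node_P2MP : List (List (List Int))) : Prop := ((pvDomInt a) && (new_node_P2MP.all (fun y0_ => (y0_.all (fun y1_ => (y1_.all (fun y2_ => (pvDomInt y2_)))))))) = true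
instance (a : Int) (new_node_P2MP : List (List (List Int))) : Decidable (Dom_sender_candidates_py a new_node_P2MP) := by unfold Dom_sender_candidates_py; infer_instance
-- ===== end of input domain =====

-- B replaces A's two-accumulator partition loop with a single stable sort of the
-- index range under a 0/1 activation key (more idiomatic; same return value).

-- ===== PORT A =====
-- literal port: the loop keeps (active, inactive); try int(row[p][5]) except -> -1
def sender_candidates_py (a : Int) (new_node_P2MP : List (List (List Int))) : List Int :=
  let row := PySem.List.pyGetD new_node_P2MP a []
  let st := (PySem.List.pyRange 0 (PySem.List.len row) 1).foldl
    (fun (st : List Int × List Int) p =>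
      let base_fs := PySem.List.pyGetD (PySem.List.pyGetD row p []) 5 (-1)
      if 0 ≤ base_fs then (st.1 ++ [p], st.2) else (st.1, st.2 ++ [p]))
    ([], [])
  st.1 ++ st.2

-- ===== PORT B =====
-- literal port of Source B: stable sort of range(len(row)) by key 0 (active) / 1 (inactive)
def sender_candidates_py_alt (a : Int) (new_node_P2MP : List (List (List Int))) : List Int :=
  let row := PySem.List.pyGetD new_node_P2MP a []
  PySem.List.sorted (PySem.List.pyRange 0 (PySem.List.len row) 1)
    (fun p =>
      if 0 ≤ PySem.List.pyGetD (PySem.List.pyGetD row p []) 5 (-1) then (0 : Int) else 1)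

-- ===== PRECONDITION & SPEC =====
-- Pre_ excludes only the inputs where A raises IndexError: index a out of Python range for new_node_P2MP.
def Pre_sender_candidates_py (a : Int) (new_node_P2MP : List (List (List Int))) : Prop :=
  PySem.Raise.InRange new_node_P2MP.length a
instance (a : Int) (new_node_P2MP : List (List (List Int))) : Decidable (Pre_sender_candidates_py a new_node_P2MP) := by unfold Pre_sender_candidates_py; infer_instance

def pvWitness_sender_candidates_py : Int × List (List (List Int)) := (0, [[[0, 0, 0, 0, 0, 5], [1]]])

def Spec_sender_candidates_py (a : Int) (new_node_P2MP : List (List (List Int))) (out : List Int) : Prop := out = sender_candidates_py_alt a new_node_P2MP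
instance (a : Int) (new_node_P2MP : List (List (List Int))) (out : List Int) : Decidable (Spec_sender_candidates_py a new_node_P2MP out) := by unfold Spec_sender_candidates_py; infer_instance

-- ===== CLAIM (what is proved, stated in full; the proofs are below) =====
def Claim_equal_sender_candidates_py : Prop := ∀ (a : Int) (new_node_P2MP : List (List (List Int))), Dom_sender_candidates_py a new_node_P2MP → Pre_sender_candidates_py a new_node_P2MP → Spec_sender_candidates_py a new_node_P2MP (sender_candidates_py a new_node_P2MP)

-- ===== LEMMAS AND PROOFS =====

-- inserting an "inactive" element (key 1) into active++inactive appends it at the end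
theorem insertBy_key_one {c : Int → Bool} (x : Int) (A I : List Int)
    (hA : ∀ y ∈ A, c y = true) (hI : ∀ y ∈ I, c y = false) (hx : c x = false) :
    PySem.List.insertBy
      (fun a b => decide ((if c a then (0 : Int) else 1) < (if c b then (0 : Int) else 1))) x (A ++ I)
      = A ++ (I ++ [x]) := by
  rw [PySem.List.insertBy_of_forall_not_before]
  · simp
  · intro y hy
    simp only [hx]
    rcases List.mem_append.1 hy with h | h
    · simp [hA y h]
    · simp [hI y h]

-- inserting an "active" element (key 0) into active++inactive lands after the active ones
theorem insertBy_key_zero {c : Int → Bool} (x : Int) (A I : List Int)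
    (hA : ∀ y ∈ A, c y = true) (hI : ∀ y ∈ I, c y = false) (hx : c x = true) :
    PySem.List.insertBy
      (fun a b => decide ((if c a then (0 : Int) else 1) < (if c b then (0 : Int) else 1))) x (A ++ I)
      = (A ++ [x]) ++ I := by
  induction A with
  | nil =>
    cases I with
    | nil => simp [PySem.List.insertBy]
    | cons z I' =>
      have hz := hI z (by simp)
      simp [PySem.List.insertBy, hx, hz]
  | cons a A' ih =>
    have ha := hA a (by simp)
    simp only [List.cons_append, PySem.List.insertBy, hx, ha, if_true, decide_eq_true_eq]
    rw [if_neg (by omega)]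
    rw [ih (fun y hy => hA y (by simp [hy]))]

-- the insertion sort with a 0/1 key maintains the partition invariant
theorem foldl_insertBy_partition (c : Int → Bool) :
    ∀ (l A I : List Int), (∀ y ∈ A, c y = true) → (∀ y ∈ I, c y = false) →
    l.foldl
      (fun acc x => PySem.List.insertBy
        (fun a b => decide ((if c a then (0 : Int) else 1) < (if c b then (0 : Int) else 1))) x acc)
      (A ++ I)
      = (l.foldl (fun (st : List Int × List Int) x =>
          if c x then (st.1 ++ [x], st.2) else (st.1, st.2 ++ [x])) (A, I)).1
        ++ (l.foldl (fun (st : List Int × List Int) x =>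
          if c x then (st.1 ++ [x], st.2) else (st.1, st.2 ++ [x])) (A, I)).2 := by
  intro l
  induction l with
  | nil => intro A I _ _; simp
  | cons x l ih =>
    intro A I hA hI
    cases hx : c x with
    | true =>
      simp only [List.foldl_cons, hx, if_true]
      rw [insertBy_key_zero x A I hA hI hx]
      exact ih (A ++ [x]) I
        (fun y hy => by rcases List.mem_append.1 hy with h | h
                        · exact hA y h
                        · simp at h; simpa [h] using hx) hI
    | false =>
      simp only [List.foldl_cons, hx]
      rw [insertBy_key_one x A I hA hI hx]
      exact ih A (I ++ [x]) hA
        (fun y hy => by rcases List.mem_append.1 hy with h | h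
                        · exact hI y h
                        · simp at h; simpa [h] using hx)

-- ===== VERDICT (by name: the statement is the Claim_ definition above) =====
theorem sender_candidates_py_spec : Claim_equal_sender_candidates_py := by
  intro a nn _ _
  unfold Spec_sender_candidates_py sender_candidates_py sender_candidates_py_alt
  simp only []
  generalize PySem.List.pyGetD nn a [] = row
  set c : Int → Bool :=
    fun p => decide (0 ≤ PySem.List.pyGetD (PySem.List.pyGetD row p []) 5 (-1)) with hc
  have hkey : (fun p =>
      if 0 ≤ PySem.List.pyGetD (PySem.List.pyGetD row p []) 5 (-1) then (0 : Int) else 1)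
      = fun p => if c p then (0 : Int) else 1 := by
    funext p; simp [hc]
  rw [hkey, PySem.List.sorted_eq_foldl_insertBy]
  have hstep : (fun (st : List Int × List Int) p =>
      let base_fs := PySem.List.pyGetD (PySem.List.pyGetD row p []) 5 (-1)
      if 0 ≤ base_fs then (st.1 ++ [p], st.2) else (st.1, st.2 ++ [p]))
      = fun (st : List Int × List Int) x =>
          if c x then (st.1 ++ [x], st.2) else (st.1, st.2 ++ [x]) := by
    funext st p; simp [hc]
  simp only [hstep]
  have h := foldl_insertBy_partition c (PySem.List.pyRange 0 (PySem.List.len row) 1) [] []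
    (by simp) (by simp)
  simpa using h.symm
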